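-- pv_equiv track=rewrite | github.com/jimk0099/Hirschberg-Algorithm | hirschberg_kal_final.py | UpdateAlignments
-- ===== SOURCE A (Python) =====
-- def UpdateAlignments(list1, list2, WW, ZZ, WWtemp, ZZtemp):
--     # Recursion function that updates the output properly
--     # list1, list2: the indices1 and indices2 lists that are made above
--
--     if(list1 == [] or list2 == []):                                                 # base of recursion
--         WW.append(WWtemp)
--         ZZ.append(ZZtemp)
--     elif(len(list1) < len(list2)):                                                  # if list1 is smaller that list2
--         if list1[0] not in list2:                                                   # search for current item in list 1 and 'repeat' for the other elements with recursion
--             UpdateAlignments(list1[1:], list2, WW, ZZ, WWtemp, ZZtemp)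
--     else:
--         if list2[0] not in list1:                                                   # if list2 bigger or equal with list1
--             UpdateAlignments(list1, list2[1:], WW, ZZ, WWtemp, ZZtemp)
--     return (WW, ZZ)
-- ===== SOURCE B (Python) =====
-- def UpdateAlignments(list1, list2, WW, ZZ, WWtemp, ZZtemp):
--     # The branch chosen by the length comparison never changes during the walk,
--     # so one pass over the shorter side with a set of the other side suffices.
--     if len(list1) < len(list2):
--         scan, other = list1, set(list2)
--     else:
--         scan, other = list2, set(list1)
--     if all(x not in other for x in scan):
--         WW.append(WWtemp)
--         ZZ.append(ZZtemp)
--     return (WW, ZZ)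
-- ===== Notes on version B (the rewrite author's own statement) =====
-- stated objective: simpler
-- what changed: Replaced A's slice-and-recurse walk (rebuilding a list and doing a linear membership scan at every step) by the observation that the length comparison never flips during the walk, so a single non-recursive disjointness pass over the shorter list against a set of the other list gives the same result.
import Mathlib
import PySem

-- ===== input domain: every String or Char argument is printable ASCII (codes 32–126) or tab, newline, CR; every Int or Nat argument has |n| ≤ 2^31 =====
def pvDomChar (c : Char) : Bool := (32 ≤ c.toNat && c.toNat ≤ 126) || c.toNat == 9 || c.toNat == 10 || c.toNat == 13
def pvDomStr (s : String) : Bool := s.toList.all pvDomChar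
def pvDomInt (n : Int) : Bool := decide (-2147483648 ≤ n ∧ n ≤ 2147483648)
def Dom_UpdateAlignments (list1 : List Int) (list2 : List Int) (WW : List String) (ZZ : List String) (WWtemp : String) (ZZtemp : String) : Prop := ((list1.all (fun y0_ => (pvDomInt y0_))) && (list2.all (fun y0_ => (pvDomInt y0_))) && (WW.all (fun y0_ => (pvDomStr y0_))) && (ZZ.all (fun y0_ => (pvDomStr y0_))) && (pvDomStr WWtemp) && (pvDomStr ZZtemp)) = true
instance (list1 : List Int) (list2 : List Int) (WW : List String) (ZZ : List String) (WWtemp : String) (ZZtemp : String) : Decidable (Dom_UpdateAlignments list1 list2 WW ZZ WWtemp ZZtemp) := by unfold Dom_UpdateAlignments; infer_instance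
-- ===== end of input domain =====

-- B replaces A's slice-and-recurse walk by a single non-recursive disjointness pass over the
-- shorter list against a set of the other list (simpler); equivalence is about the RETURN value —
-- Python A and B both also append to WW/ZZ in place exactly when the result carries the appended temps.

-- ===== PORT A =====
-- literal transliteration of A's recursion; list1[1:] is List.tail, 'x not in l' is !(l.contains x)
def UpdateAlignments (list1 : List Int) (list2 : List Int) (WW : List String) (ZZ : List String) (WWtemp : String) (ZZtemp : String) : List String × List String :=
  if _h : list1 = [] ∨ list2 = [] then
    (WW ++ [WWtemp], ZZ ++ [ZZtemp])
  else if list1.length < list2.length then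
    if !(list2.contains (list1.headD 0)) then
      UpdateAlignments list1.tail list2 WW ZZ WWtemp ZZtemp
    else (WW, ZZ)
  else
    if !(list1.contains (list2.headD 0)) then
      UpdateAlignments list1 list2.tail WW ZZ WWtemp ZZtemp
    else (WW, ZZ)
termination_by list1.length + list2.length
decreasing_by
  · rcases list1 with _ | ⟨a, t⟩ <;> simp_all
  · rcases list2 with _ | ⟨a, t⟩ <;> simp_all

-- ===== PORT B =====
def UpdateAlignments_alt (list1 : List Int) (list2 : List Int) (WW : List String) (ZZ : List String) (WWtemp : String) (ZZtemp : String) : List String × List String :=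
  let p : List Int × PySem.Set Int :=
    if list1.length < list2.length then (list1, PySem.Set.ofList list2)
    else (list2, PySem.Set.ofList list1)
  if p.1.all (fun x => !(PySem.Set.contains p.2 x)) then
    (WW ++ [WWtemp], ZZ ++ [ZZtemp])
  else (WW, ZZ)

-- ===== PRECONDITION & SPEC =====
def Spec_UpdateAlignments (list1 : List Int) (list2 : List Int) (WW : List String) (ZZ : List String) (WWtemp : String) (ZZtemp : String) (out : List String × List String) : Prop := out = UpdateAlignments_alt list1 list2 WW ZZ WWtemp ZZtemp
instance (list1 : List Int) (list2 : List Int) (WW : List String) (ZZ : List String) (WWtemp : String) (ZZtemp : String) (out : List String × List String) : Decidable (Spec_UpdateAlignments list1 list2 WW ZZ WWtemp ZZtemp out) := by unfold Spec_UpdateAlignments; infer_instance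

-- ===== CLAIM (what is proved, stated in full; the proofs are below) =====
def Claim_equal_UpdateAlignments : Prop := ∀ (list1 : List Int) (list2 : List Int) (WW : List String) (ZZ : List String) (WWtemp : String) (ZZtemp : String), Dom_UpdateAlignments list1 list2 WW ZZ WWtemp ZZtemp → Spec_UpdateAlignments list1 list2 WW ZZ WWtemp ZZtemp (UpdateAlignments list1 list2 WW ZZ WWtemp ZZtemp)

-- ===== LEMMAS AND PROOFS =====

-- A's walk with the first branch fixed (list1 strictly shorter): one scan of list1 against list2
lemma A_short (list2 : List Int) (WW ZZ : List String) (WWtemp ZZtemp : String) :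
    ∀ list1 : List Int, list1.length < list2.length →
      UpdateAlignments list1 list2 WW ZZ WWtemp ZZtemp =
        if list1.all (fun x => !(list2.contains x)) then (WW ++ [WWtemp], ZZ ++ [ZZtemp])
        else (WW, ZZ) := by
  intro list1
  induction list1 with
  | nil =>
      intro h
      rw [UpdateAlignments]
      simp
  | cons a t ih =>
      intro h
      have h2 : list2 ≠ [] := by
        intro he; rw [he] at h; simp at h
      rw [UpdateAlignments]
      have hne : ¬(a :: t = [] ∨ list2 = []) := by simp [h2]
      rw [dif_neg hne, if_pos h]
      by_cases hc : a ∈ list2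
      · simp [hc]
      · have ht : t.length < list2.length := by
          simp only [List.length_cons] at h; omega
        simp [hc, List.tail, ih ht]

-- A's walk with the second branch fixed (list1 at least as long): one scan of list2 against list1
lemma A_long (list1 : List Int) (WW ZZ : List String) (WWtemp ZZtemp : String) :
    ∀ list2 : List Int, ¬ list1.length < list2.length →
      UpdateAlignments list1 list2 WW ZZ WWtemp ZZtemp =
        if list2.all (fun x => !(list1.contains x)) then (WW ++ [WWtemp], ZZ ++ [ZZtemp])
        else (WW, ZZ) := by
  intro list2
  induction list2 with
  | nil =>
      intro h
      rw [UpdateAlignments]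
      simp
  | cons a t ih =>
      intro h
      have h1 : list1 ≠ [] := by
        intro he; rw [he] at h; simp at h
      rw [UpdateAlignments]
      have hne : ¬(list1 = [] ∨ a :: t = []) := by simp [h1]
      rw [dif_neg hne, if_neg h]
      by_cases hc : a ∈ list1
      · simp [hc]
      · have ht : ¬ list1.length < t.length := by
          simp only [List.length_cons] at h; omega
        simp [hc, List.tail, ih ht]

-- ===== VERDICT (by name: the statement is the Claim_ definition above) =====
theorem UpdateAlignments_spec : Claim_equal_UpdateAlignments := by
  intro list1 list2 WW ZZ WWtemp ZZtemp _
  unfold Spec_UpdateAlignments UpdateAlignments_alt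
  by_cases hlt : list1.length < list2.length
  · rw [A_short list2 WW ZZ WWtemp ZZtemp list1 hlt]
    simp [hlt]
  · rw [A_long list1 WW ZZ WWtemp ZZtemp list2 hlt]
    simp [hlt]
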